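-- pv_equiv track=rewrite | github.com/wqyeo/Steganography-Tool | steganography_api/api/routers/encode_route.py | _validate_bits
-- ===== SOURCE A (Python) =====
-- def _validate_bits(bits):
--     if not isinstance(bits, list):
--         return False
--     if not all(isinstance(x, int) and 0 <= x <= 7 for x in bits):
--         return False
--     if len(bits) != len(set(bits)):
--         return False
--     return True
-- ===== SOURCE B (Python) =====
-- def _validate_bits(bits):
--     if not isinstance(bits, list):
--         return False
--     if not all(isinstance(x, int) for x in bits):
--         return False
--     s = sorted(bits)
--     if not s:
--         return True
--     if s[0] < 0 or s[-1] > 7: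
--         return False
--     return all(a < b for a, b in zip(s, s[1:]))
-- ===== Notes on version B (the rewrite author's own statement) =====
-- stated objective: alternative
-- what changed: Replaced A's per-element range scan plus set()/length duplicate test by a sort-then-scan algorithm: sort the list, check the range from the smallest and largest sorted elements alone, and detect duplicates as a failure of strict increase between adjacent sorted elements.
import Mathlib
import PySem

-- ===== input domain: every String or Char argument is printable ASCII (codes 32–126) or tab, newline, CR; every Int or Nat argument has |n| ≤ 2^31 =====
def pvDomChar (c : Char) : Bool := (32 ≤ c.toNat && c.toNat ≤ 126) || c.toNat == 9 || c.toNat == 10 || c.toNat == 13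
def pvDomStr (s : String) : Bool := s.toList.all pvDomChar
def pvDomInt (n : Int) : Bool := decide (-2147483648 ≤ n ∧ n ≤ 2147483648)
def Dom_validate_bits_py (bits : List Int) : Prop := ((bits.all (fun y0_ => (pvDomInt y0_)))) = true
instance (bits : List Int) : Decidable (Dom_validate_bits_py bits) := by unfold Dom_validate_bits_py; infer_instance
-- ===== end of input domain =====

-- B replaces A's per-element range scan and set()/length duplicate test by sort-then-scan:
-- after sorting, range is checked from the two extremes only and duplicates as a failure of
-- strict adjacent increase; alternative algorithm (O(n log n)), not claimed faster.


-- ===== PORT A =====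
-- the isinstance(bits, list) / isinstance(x, int) guards are vacuously true under the type convention
def validate_bits_py (bits : List Int) : Bool :=
  if !(bits.all (fun x => decide (0 ≤ x) && decide (x ≤ 7))) then false
  else if bits.length ≠ (PySem.Set.ofList bits).length then false
  else true

-- ===== PORT B =====
-- Source B: sort, then range from the extremes, then strict adjacent increase over zip(s, s[1:])
def validate_bits_py_alt (bits : List Int) : Bool :=
  match PySem.List.sorted bits (fun x => x) false with
  | [] => true
  | h :: t =>
    if h < 0 || (h :: t).getLast (by simp) > 7 then false
    else ((h :: t).zip t).all (fun p => decide (p.1 < p.2))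

-- ===== PRECONDITION & SPEC =====
def Spec_validate_bits_py (bits : List Int) (out : Bool) : Prop := out = validate_bits_py_alt bits
instance (bits : List Int) (out : Bool) : Decidable (Spec_validate_bits_py bits out) := by unfold Spec_validate_bits_py; infer_instance

-- ===== CLAIM (what is proved, stated in full; the proofs are below) =====
def Claim_equal_validate_bits_py : Prop := ∀ (bits : List Int), Dom_validate_bits_py bits → Spec_validate_bits_py bits (validate_bits_py bits)

-- ===== LEMMAS AND PROOFS =====

lemma ofList_len_lt_of_not_nodup (xs : List Int) (h : ¬ xs.Nodup) :
    (PySem.Set.ofList xs).length < xs.length := by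
  induction xs with
  | nil => simp at h
  | cons x xs ih =>
    rw [PySem.Set.ofList_cons]
    simp only [List.nodup_cons, not_and_or] at h
    rcases h with hx | hnd
    · rw [not_not] at hx
      have hmem : x ∈ PySem.Set.ofList xs := (PySem.Set.mem_ofList _ _).2 hx
      have hlt : ((PySem.Set.ofList xs).discard x).length < (PySem.Set.ofList xs).length := by
        unfold PySem.Set.discard
        exact List.length_filter_lt_length_iff_exists.2 ⟨x, hmem, by simp⟩
      have := PySem.Set.length_ofList_le xs
      simp only [List.length_cons]
      omega
    · have := ih hnd
      have hle : ((PySem.Set.ofList xs).discard x).length ≤ (PySem.Set.ofList xs).length := by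
        unfold PySem.Set.discard; exact List.length_filter_le _ _
      simp only [List.length_cons]
      omega

lemma A_true_iff (bits : List Int) :
    validate_bits_py bits = true ↔ (∀ x ∈ bits, 0 ≤ x ∧ x ≤ 7) ∧ bits.Nodup := by
  unfold validate_bits_py
  constructor
  · intro h
    split_ifs at h with h1 h2
    · simp only [Bool.not_eq_true', List.all_eq_false] at h1
      have hall : ∀ x ∈ bits, 0 ≤ x ∧ x ≤ 7 := by
        intro x hx
        by_contra hc
        exact h1 ⟨x, hx, by simpa using hc⟩
      refine ⟨hall, ?_⟩
      by_contra hnd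
      exact absurd (ofList_len_lt_of_not_nodup bits hnd) (by omega)
  · rintro ⟨hall, hnd⟩
    rw [if_neg, if_neg]
    · rw [PySem.Set.ofList_eq_self_of_nodup bits hnd]; simp
    · simp only [Bool.not_eq_true', Bool.not_eq_false, List.all_eq_true]
      intro x hx
      simpa using hall x hx

-- adjacent all-< over zip(s, s.tail) is equivalent to Pairwise (· < ·) (by transitivity)
lemma adj_all_iff_pairwise (s : List Int) :
    ((s.zip s.tail).all (fun p => decide (p.1 < p.2)) = true) ↔ s.Pairwise (· < ·) := by
  induction s with
  | nil => simp
  | cons h t ih =>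
    cases t with
    | nil => simp
    | cons h2 t2 =>
      simp only [List.tail_cons] at ih ⊢
      simp only [List.zip_cons_cons, List.all_cons, Bool.and_eq_true, decide_eq_true_eq]
      rw [ih]
      constructor
      · rintro ⟨hlt, hpw⟩
        rw [List.pairwise_cons]
        refine ⟨fun y hy => ?_, hpw⟩
        rcases List.mem_cons.1 hy with rfl | hy'
        · exact hlt
        · exact lt_trans hlt (List.rel_of_pairwise_cons hpw hy')
      · intro hpw
        rw [List.pairwise_cons] at hpw
        exact ⟨hpw.1 h2 (by simp), hpw.2⟩

-- every element of a (· ≤ ·)-Pairwise list is ≤ its last element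
lemma mem_le_getLast (l : List Int) (hp : l.Pairwise (· ≤ ·)) (x : Int) (hx : x ∈ l)
    (hne : l ≠ []) : x ≤ l.getLast hne := by
  induction l with
  | nil => simp at hx
  | cons h t ih =>
    cases t with
    | nil => simp at hx; simp [hx, List.getLast]
    | cons h2 t2 =>
      rw [List.getLast_cons (by simp)]
      rcases List.mem_cons.1 hx with rfl | hx'
      · exact le_trans (List.rel_of_pairwise_cons hp (List.getLast_mem _))
          (le_refl _)
      · exact ih (List.Pairwise.of_cons hp) hx' (by simp)

lemma B_true_iff (bits : List Int) :
    validate_bits_py_alt bits = true ↔ (∀ x ∈ bits, 0 ≤ x ∧ x ≤ 7) ∧ bits.Nodup := by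
  have hperm : (PySem.List.sorted bits (fun x => x) false).Perm bits :=
    PySem.List.sorted_perm bits (fun x => x) false
  have hpw : (PySem.List.sorted bits (fun x => x) false).Pairwise (· ≤ ·) := by
    simpa using PySem.List.sorted_pairwise bits (fun x => x)
  rcases hs : PySem.List.sorted bits (fun x => x) false with _ | ⟨h, t⟩
  · have hbn : bits = [] := by
      have := hperm; rw [hs] at this
      simpa using this.symm.eq_nil
    subst hbn
    simp [validate_bits_py_alt, hs]
  · rw [hs] at hperm hpw
    have hz : (((h :: t).zip t).all (fun p => decide (p.1 < p.2)))
        = (((h :: t).zip (h :: t).tail).all (fun p => decide (p.1 < p.2))) := rfl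
    simp only [validate_bits_py_alt, hs, gt_iff_lt]
    constructor
    · intro hb
      split_ifs at hb with hrange
      rw [hz, adj_all_iff_pairwise] at hb
      · simp only [Bool.or_eq_true, decide_eq_true_eq, not_or, not_lt] at hrange
        constructor
        · intro x hx
          have hxs : x ∈ h :: t := hperm.mem_iff.2 hx
          constructor
          · rcases List.mem_cons.1 hxs with rfl | hx'
            · exact hrange.1
            · exact le_trans hrange.1 (List.rel_of_pairwise_cons hpw hx')
          · exact le_trans (mem_le_getLast _ hpw x hxs (by simp)) hrange.2
        · exact hperm.nodup_iff.1 (List.Pairwise.imp ne_of_lt hb)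
    · rintro ⟨hall, hnd⟩
      have hnds : (h :: t).Nodup := hperm.nodup_iff.2 hnd
      have hlt : (h :: t).Pairwise (· < ·) := by
        refine (hpw.and hnds).imp ?_
        rintro a b ⟨hle, hne⟩
        exact lt_of_le_of_ne hle hne
      have hh := hall h (hperm.mem_iff.1 (by simp))
      have hl := hall ((h :: t).getLast (by simp))
        (hperm.mem_iff.1 (List.getLast_mem _))
      split_ifs with hrange
      · simp only [Bool.or_eq_true, decide_eq_true_eq] at hrange
        rcases hrange with hr | hr
        · exact absurd hh.1 (not_le.2 hr)
        · exact absurd hl.2 (not_le.2 hr)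
      · rw [hz, adj_all_iff_pairwise]
        exact hlt

-- ===== VERDICT (by name: the statement is the Claim_ definition above) =====
theorem validate_bits_py_spec : Claim_equal_validate_bits_py := by
  intro bits _
  unfold Spec_validate_bits_py
  rw [Bool.eq_iff_iff, A_true_iff, B_true_iff]
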